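-- pv_equiv track=rewrite | github.com/jt-lanl/fever-probes | probe.py | longestStem
-- ===== SOURCE A (Python) =====
-- RC_Table = str.maketrans("ATCG","TAGC")
--
-- def reverse_complement(s):
--     ''' return the reverse complement of string s:
--     A <-> T, C <-> G, and order is revered '''
--     ## Uses RC_Table which is defined globally, above
--     return s.translate(RC_Table)[::-1]
--
-- def longestStem(s):
--     n = len(s)
--     k = int(n/2) #length of longest possible stem
--     candidate = ''
--     i = 1
--
--     while i <= k and len(candidate) == i - 1:
--         for j in range(n-2*i+1):
--             t = s[j:i+j]
--             if reverse_complement(t) in s[i+j:]: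
--                 candidate = t
--                 break
--         i +=1
--     return candidate
-- ===== SOURCE B (Python) =====
-- RC_Table = str.maketrans("ATCG","TAGC")
--
-- def longestStem(s):
--     # Binary search on stem length (existence of a stem is downward closed),
--     # then recover the first (leftmost) stem of the maximal length.
--     n = len(s)
--     k = n // 2
--
--     def first_j(i):
--         # first j with reverse-complement of s[j:j+i] occurring in s[i+j:], else None
--         for j in range(n - 2 * i + 1):
--             t = s[j:j + i]
--             if t.translate(RC_Table)[::-1] in s[i + j:]:
--                 return j
--         return None
--
--     lo, hi = 0, k
--     while lo < hi:
--         mid = (lo + hi + 1) // 2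
--         if first_j(mid) is not None:
--             lo = mid
--         else:
--             hi = mid - 1
--     if lo == 0:
--         return ''
--     j = first_j(lo)
--     return s[j:j + lo]
-- ===== Notes on version B (the rewrite author's own statement) =====
-- stated objective: alternative
-- what changed: A grows the stem length one at a time in an ascending while-loop that re-scans all windows per length; B binary-searches on the stem length (stem existence is downward closed in the length) and then recovers the first stem of the maximal length.
import Mathlib
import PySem

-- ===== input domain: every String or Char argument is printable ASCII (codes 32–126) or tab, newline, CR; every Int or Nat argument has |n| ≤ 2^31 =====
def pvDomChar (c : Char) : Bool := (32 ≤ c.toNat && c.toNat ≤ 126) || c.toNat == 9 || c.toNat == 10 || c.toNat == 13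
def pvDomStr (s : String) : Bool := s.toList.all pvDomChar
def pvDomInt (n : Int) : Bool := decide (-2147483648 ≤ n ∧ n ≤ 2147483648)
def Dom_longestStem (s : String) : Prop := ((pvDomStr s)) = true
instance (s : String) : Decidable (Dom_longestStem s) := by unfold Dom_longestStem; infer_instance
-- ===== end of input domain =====

-- B replaces A's ascending try-every-length while-loop by a binary search on the stem
-- length (stem existence is downward closed in the length), then recovers the first stem
-- of the maximal length; objective: alternative algorithm (not measured faster).

-- ===== PORT A =====

-- str.maketrans("ATCG","TAGC") applied to one character (all other characters unchanged)
def pvComp (c : Char) : Char :=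
  if c = 'A' then 'T' else if c = 'T' then 'A'
  else if c = 'C' then 'G' else if c = 'G' then 'C' else c

-- reverse_complement: s.translate(RC_Table)[::-1]; [::-1] is reverse (PySem.List.slice?_none_none_neg_one)
def pvRC (t : List Char) : List Char := (t.map pvComp).reverse

-- A's inner `for j in range(n-2*i+1)` (the Nat bound n+1-2*i clamps at 0 exactly as an
-- empty Python range does): set candidate = t and break at the first hit, else keep candidate
def lsFor (s : List Char) (i : Nat) (js : List Nat) (cand : List Char) : List Char :=
  match js with
  | [] => cand
  | j :: rest =>
    let t := PySem.List.slice s (some (j : Int)) (some ((i + j : Nat) : Int))  -- s[j:i+j]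
    if PySem.Chars.isIn (pvRC t) (PySem.List.slice s (some ((i + j : Nat) : Int)) none)  -- in s[i+j:]
    then t else lsFor s i rest cand

-- A's `while i <= k and len(candidate) == i - 1`; fuel ≥ k + 1 - i is a totality guard
-- only (the loop runs at most k - i + 1 rounds: exhausted fuel means i > k, loop over)
def lsWhile (s : List Char) (n k : Nat) (fuel i : Nat) (cand : List Char) : List Char :=
  match fuel with
  | 0 => cand
  | fuel + 1 =>
    if i ≤ k ∧ cand.length = i - 1 then
      lsWhile s n k fuel (i + 1) (lsFor s i (List.range (n + 1 - 2 * i)) cand)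
    else cand

def longestStem (s : String) : String :=
  let cs := s.toList
  let n := cs.length
  let k := n / 2   -- int(n/2) = n // 2 since n ≥ 0
  String.ofList (lsWhile cs n k k 1 [])

-- ===== PORT B =====

-- Source B's first_j: first j in range(n-2*i+1) whose reverse-complemented window recurs later
-- (s[j:j+i] with j,i ≥ 0 is (drop j).take i, PySem.List.slice_natCast_add; s[i+j:] is drop (i+j))
def pvFirstJ (s : List Char) (n i : Nat) : Option Nat :=
  (List.range (n + 1 - 2 * i)).find? fun j =>
    PySem.Chars.isIn (pvRC ((s.drop j).take i)) (s.drop (i + j))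

-- Source B's `while lo < hi` binary search; (lo+hi+1)//2 on nonnegative ints is Nat
-- division; fuel ≥ hi - lo is a totality guard only (hi - lo shrinks every round:
-- exhausted fuel means lo = hi, loop over)
def pvBsearch (s : List Char) (n : Nat) (fuel lo hi : Nat) : Nat :=
  match fuel with
  | 0 => lo
  | fuel + 1 =>
    if lo < hi then
      let mid := (lo + hi + 1) / 2
      if (pvFirstJ s n mid).isSome then pvBsearch s n fuel mid hi
      else pvBsearch s n fuel lo (mid - 1)
    else lo

def longestStem_alt (s : String) : String :=
  let cs := s.toList
  let n := cs.length
  let k := n / 2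
  let lo := pvBsearch cs n k 0 k
  if lo = 0 then ""
  else
    match pvFirstJ cs n lo with
    | some j => String.ofList ((cs.drop j).take lo)  -- s[j:j+lo]
    | none => ""  -- unreachable (lo > 0 only when pvFirstJ cs n lo is some); totality guard

-- ===== PRECONDITION & SPEC =====
def Spec_longestStem (s : String) (out : String) : Prop := out = longestStem_alt s
instance (s : String) (out : String) : Decidable (Spec_longestStem s out) := by unfold Spec_longestStem; infer_instance

-- ===== CLAIM (what is proved, stated in full; the proofs are below) =====
def Claim_equal_longestStem : Prop := ∀ (s : String), Dom_longestStem s → Spec_longestStem s (longestStem s)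

-- ===== LEMMAS AND PROOFS =====

-- the per-window test both programs make
def pvCheck (s : List Char) (i j : Nat) : Bool :=
  PySem.Chars.isIn (pvRC ((s.drop j).take i)) (s.drop (i + j))

-- "a stem of length i exists"
abbrev pvP (s : List Char) (n i : Nat) : Prop := (pvFirstJ s n i).isSome = true

-- the first stem of length m (the value A's candidate holds after round m succeeds)
def pvAns (s : List Char) (n m : Nat) : List Char :=
  match pvFirstJ s n m with
  | some j => (s.drop j).take m
  | none => []

theorem pvFirstJ_eq_find? (s : List Char) (n i : Nat) :
    pvFirstJ s n i = (List.range (n + 1 - 2 * i)).find? (fun j => pvCheck s i j) := rfl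

theorem pvFirstJ_zero (s : List Char) (n : Nat) : pvFirstJ s n 0 = some 0 := by
  have h : n + 1 - 2 * 0 = n + 1 := by omega
  rw [pvFirstJ_eq_find?, h, List.range_succ_eq_map]
  simp [List.find?, pvCheck, pvRC]

theorem pvP_zero (s : List Char) (n : Nat) : pvP s n 0 := by
  simp [pvP, pvFirstJ_zero]

theorem pvCheck_mono (s : List Char) (i j : Nat) (h : j + (i + 1) ≤ s.length)
    (hc : pvCheck s (i + 1) j = true) : pvCheck s i j = true := by
  rw [pvCheck, PySem.Chars.isIn_iff_infix] at hc ⊢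
  have hlen : i < (s.drop j).length := by simp [List.length_drop]; omega
  have htake : (s.drop j).take (i + 1) = (s.drop j).take i ++ [(s.drop j)[i]] := by
    rw [List.take_add_one, List.getElem?_eq_getElem hlen]
    rfl
  have hsuf : pvRC ((s.drop j).take i) <:+ pvRC ((s.drop j).take (i + 1)) := by
    rw [htake]
    simp [pvRC, List.map_append, List.reverse_append]
  have hdrop : s.drop (i + 1 + j) <:+ s.drop (i + j) := by
    have : s.drop (i + 1 + j) = (s.drop (i + j)).drop 1 := by
      rw [List.drop_drop]; congr 1; omega
    rw [this]; exact List.drop_suffix 1 _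
  exact (hsuf.isInfix.trans hc).trans hdrop.isInfix

theorem pvP_succ_mono (s : List Char) (n i : Nat) (hn : n = s.length)
    (h : pvP s n (i + 1)) : pvP s n i := by
  rw [pvP, pvFirstJ_eq_find?, List.find?_isSome] at h ⊢
  obtain ⟨j, hjmem, hj⟩ := h
  rw [List.mem_range] at hjmem
  refine ⟨j, List.mem_range.2 (by omega), ?_⟩
  exact pvCheck_mono s i j (by omega) hj

theorem pvP_down (s : List Char) (n : Nat) (hn : n = s.length) {a b : Nat}
    (hab : a ≤ b) (h : pvP s n b) : pvP s n a := by
  induction b with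
  | zero => have : a = 0 := by omega
            simpa [this] using h
  | succ b ih =>
    rcases Nat.lt_or_ge a (b + 1) with hlt | hge
    · exact ih (by omega) (pvP_succ_mono s n b hn h)
    · have : a = b + 1 := by omega
      simpa [this] using h

theorem pvAns_length (s : List Char) (n m : Nat) (hn : n = s.length)
    (hm : 2 * m ≤ n) (h : pvP s n m) : (pvAns s n m).length = m := by
  rw [pvP] at h
  obtain ⟨j, hj⟩ := Option.isSome_iff_exists.1 h
  have hjmem := List.mem_of_find?_eq_some (p := fun j => pvCheck s m j) hj
  rw [List.mem_range] at hjmem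
  rw [pvAns, hj]
  simp [List.length_take, List.length_drop]
  omega

theorem lsFor_eq (s : List Char) (i : Nat) (js : List Nat) (cand : List Char) :
    lsFor s i js cand =
      match js.find? (fun j => pvCheck s i j) with
      | some j => (s.drop j).take i
      | none => cand := by
  induction js with
  | nil => rfl
  | cons j rest ih =>
    rw [lsFor]
    rw [PySem.List.slice_natCast, PySem.List.slice_from_natCast]
    have harg : i + j - j = i := by omega
    rw [harg]
    rw [List.find?_cons]
    by_cases hc : pvCheck s i j = true
    · rw [if_pos (by simpa [pvCheck] using hc)]
      simp [hc]
    · rw [if_neg (by simpa [pvCheck] using hc)]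
      simp only [Bool.not_eq_true] at hc
      simp [hc, ih]

theorem lsWhile_noop (s : List Char) (n k fuel i : Nat) (cand : List Char)
    (h : ¬ (i ≤ k ∧ cand.length = i - 1)) : lsWhile s n k fuel i cand = cand := by
  cases fuel <;> simp [lsWhile, h]

theorem lsWhile_eq (s : List Char) (n k : Nat) (hn : n = s.length) (hk : k = n / 2) :
    ∀ (fuel i : Nat) (cand : List Char), k + 1 - i ≤ fuel → 1 ≤ i → i - 1 ≤ k → pvP s n (i - 1) →
      cand = pvAns s n (i - 1) →
      lsWhile s n k fuel i cand = pvAns s n (Nat.findGreatest (fun m => pvP s n m) k) := by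
  intro fuel
  induction fuel with
  | zero =>
    intro i cand hd h1 hik hP hcand
    -- fuel 0 forces i > k: the while condition fails at once
    simp only [lsWhile]
    have hFG : Nat.findGreatest (fun m => pvP s n m) k = i - 1 :=
      le_antisymm (le_trans (Nat.findGreatest_le k) (by omega))
        (Nat.le_findGreatest hik hP)
    rw [hFG, hcand]
  | succ d ih =>
    intro i cand hd h1 hik hP hcand
    by_cases hle : i ≤ k
    · have hlen : cand.length = i - 1 := by
        rw [hcand]; exact pvAns_length s n (i - 1) hn (by omega) hP
      simp only [lsWhile]
      rw [if_pos ⟨hle, hlen⟩]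
      have hfor : lsFor s i (List.range (n + 1 - 2 * i)) cand =
          match pvFirstJ s n i with
          | some j => (s.drop j).take i
          | none => cand := by
        rw [lsFor_eq, pvFirstJ_eq_find?]
      cases hfj : pvFirstJ s n i with
      | some j =>
        rw [hfor, hfj]
        exact ih (i + 1) _ (by omega) (by omega) (by omega)
          (by simpa [pvP] using congrArg Option.isSome hfj)
          (by simp [pvAns, hfj])
      | none =>
        rw [hfor, hfj]
        rw [lsWhile_noop s n k d (i + 1) cand (by rw [not_and]; intro _; rw [hlen]; omega)]
        have hnotPi : ¬ pvP s n i := by simp [pvP, hfj]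
        have hFG : Nat.findGreatest (fun m => pvP s n m) k = i - 1 := by
          refine le_antisymm ?_ (Nat.le_findGreatest (by omega) hP)
          by_contra hgt
          rw [not_le] at hgt
          have hPF : pvP s n (Nat.findGreatest (fun m => pvP s n m) k) :=
            Nat.findGreatest_of_ne_zero rfl (by omega)
          exact hnotPi (pvP_down s n hn (by omega) hPF)
        rw [hFG, hcand]
    · rw [lsWhile_noop s n k (d + 1) i cand (fun h => hle h.1)]
      have hFG : Nat.findGreatest (fun m => pvP s n m) k = i - 1 :=
        le_antisymm (le_trans (Nat.findGreatest_le k) (by omega))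
          (Nat.le_findGreatest hik hP)
      rw [hFG, hcand]

theorem pvBsearch_eq (s : List Char) (n k : Nat) (hn : n = s.length) :
    ∀ (fuel lo hi : Nat), hi - lo ≤ fuel → pvP s n lo → hi ≤ k → lo ≤ hi →
      (∀ m, hi < m → m ≤ k → ¬ pvP s n m) →
      pvBsearch s n fuel lo hi = Nat.findGreatest (fun m => pvP s n m) k := by
  intro fuel
  induction fuel with
  | zero =>
    intro lo hi hd hPlo hhik hlohi habove
    -- fuel 0 forces lo = hi: the loop is over
    have hlh : lo = hi := by omega
    simp only [pvBsearch]
    refine le_antisymm (Nat.le_findGreatest (by omega) hPlo) ?_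
    by_contra hgt
    rw [not_le] at hgt
    have hPF : pvP s n (Nat.findGreatest (fun m => pvP s n m) k) :=
      Nat.findGreatest_of_ne_zero rfl (by omega)
    exact habove _ (by omega) (Nat.findGreatest_le k) hPF
  | succ d ih =>
    intro lo hi hd hPlo hhik hlohi habove
    by_cases hlt : lo < hi
    · simp only [pvBsearch]
      rw [if_pos hlt]
      have hmid : lo < (lo + hi + 1) / 2 ∧ (lo + hi + 1) / 2 ≤ hi := by omega
      cases hfj : (pvFirstJ s n ((lo + hi + 1) / 2)).isSome with
      | true =>
        simp only [if_true]
        exact ih _ hi (by omega) hfj hhik (by omega) habove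
      | false =>
        simp only [if_false, Bool.false_eq_true]
        refine ih lo _ (by omega) hPlo (by omega) (by omega) ?_
        intro m hm hmk hPm
        rcases Nat.lt_or_ge hi m with hbig | hsmall
        · exact habove m hbig hmk hPm
        · have : pvP s n ((lo + hi + 1) / 2) :=
            pvP_down s n hn (by omega) hPm
          rw [pvP] at this
          simp [hfj] at this
    · have hlh : lo = hi := by omega
      simp only [pvBsearch]
      rw [if_neg hlt]
      refine le_antisymm (Nat.le_findGreatest (by omega) hPlo) ?_
      by_contra hgt
      rw [not_le] at hgt
      have hPF : pvP s n (Nat.findGreatest (fun m => pvP s n m) k) :=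
        Nat.findGreatest_of_ne_zero rfl (by omega)
      exact habove _ (by omega) (Nat.findGreatest_le k) hPF

-- ===== VERDICT (by name: the statement is the Claim_ definition above) =====
theorem longestStem_spec : Claim_equal_longestStem := by
  intro s _
  unfold Spec_longestStem longestStem longestStem_alt
  simp only []
  set cs := s.toList with hcs
  set n := cs.length with hnn
  set k := n / 2 with hkk
  have hA : lsWhile cs n k k 1 [] = pvAns cs n (Nat.findGreatest (fun m => pvP cs n m) k) := by
    refine lsWhile_eq cs n k rfl rfl k 1 [] (by omega) (by omega) (by omega)
      (by simpa using pvP_zero cs n) ?_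
    simp [pvAns, pvFirstJ_zero]
  have hB : pvBsearch cs n k 0 k = Nat.findGreatest (fun m => pvP cs n m) k := by
    refine pvBsearch_eq cs n k rfl k 0 k (by omega) (pvP_zero cs n) le_rfl (Nat.zero_le _) ?_
    intro m h1 h2; omega
  rw [hA, hB]
  set FG := Nat.findGreatest (fun m => pvP cs n m) k with hFGdef
  by_cases hFG : FG = 0
  · rw [if_pos hFG, hFG]
    simp [pvAns, pvFirstJ_zero]
  · rw [if_neg hFG]
    have hPF : pvP cs n FG := Nat.findGreatest_of_ne_zero hFGdef.symm hFG
    rw [pvP] at hPF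
    obtain ⟨j, hj⟩ := Option.isSome_iff_exists.1 hPF
    rw [hj, pvAns, hj]
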